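-- pv_equiv track=rewrite | github.com/CowardlyBattleCat/transfer_work | coll_loop_functions.py | make_triangle
-- ===== SOURCE A (Python) =====
-- def make_triangle(n):
--     '''Make a triangle containing the integers from 0 to (n+1)*n / 2
--
--     $ make_triangle(2)
--     [[1], [2, 3]]
--     $ make_triangle(3)
--     [[1], [2, 3], [4, 5, 6]]
--
--     Parameters
--     ----------
--     n: positive integer
--
--     Returns
--     -------
--     triangle: list of lists of integers
--       A triangle continaing the consecutive integers
--     '''
--
--     if n <= 0:
--         raise ValueError('you entered a non-positive value')
--     triangle = []
--     a = 1
--     for i in range(a, n+1):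
--         triangle.append(list(range(a, a+i)))
--         a += i
--     return triangle
--
--
-- #def triangle_sum(triangle):
--     '''Sum the diagonals of a triangle of numbers.
--
--     $ triangle_sum([[1], [2, 3]])
--     [2, 4]
--
--     Because:
--     [1]
--     [2, 3] <- sum the diagonals
--      2  4
--
--     $ triangle_sum([[1], [2, 3], [4, 5, 6]])
--     [4, 7, 10]
--
--     Because:
--     [1]
--     [2, 3]
--     [4, 5, 6] <- sum the diagonals
--      4  7  10
--
--     Parameters
--     ----------
--     triangle: list of lists of numbers
--
--     Returns
--     -------
--     diagonal_sums: list of numbers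
--       The diagonal sums of the triangle.
--     '''
-- ===== SOURCE B (Python) =====
-- def make_triangle(n):
--     '''Same triangle, with each row computed independently from a closed-form
--     start (i-1)*i//2 + 1 instead of threading a running accumulator.'''
--     if n <= 0:
--         raise ValueError('you entered a non-positive value')
--     return [list(range((i - 1) * i // 2 + 1, (i - 1) * i // 2 + 1 + i))
--             for i in range(1, n + 1)]
-- ===== Notes on version B (the rewrite author's own statement) =====
-- stated objective: alternative
-- what changed: Each row is computed independently from the closed-form start (i-1)*i//2 + 1 instead of threading a mutable running accumulator through the loop.
import Mathlib
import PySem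

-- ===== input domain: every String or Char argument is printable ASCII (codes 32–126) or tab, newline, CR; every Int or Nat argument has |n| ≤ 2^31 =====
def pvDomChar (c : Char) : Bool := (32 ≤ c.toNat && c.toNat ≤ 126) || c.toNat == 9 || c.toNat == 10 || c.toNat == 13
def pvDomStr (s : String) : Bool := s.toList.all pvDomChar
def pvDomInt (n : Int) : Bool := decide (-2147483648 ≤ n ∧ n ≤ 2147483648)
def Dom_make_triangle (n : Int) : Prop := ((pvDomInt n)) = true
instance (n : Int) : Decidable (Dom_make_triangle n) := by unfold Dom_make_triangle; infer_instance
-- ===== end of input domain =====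

-- B builds each row from the closed-form start (i-1)*i//2 + 1 instead of a running accumulator.

-- ===== PORT A =====
def make_triangle (n : Int) : List (List Int) :=
  if n ≤ 0 then []   -- Python raises ValueError here; excluded by Pre_
  else
    ((PySem.List.pyRange 1 (n + 1) 1).foldl
      (fun (st : List (List Int) × Int) i =>
        (st.1 ++ [PySem.List.pyRange st.2 (st.2 + i) 1], st.2 + i))
      ([], 1)).1

-- ===== PORT B =====
def pvRowStart (i : Int) : Int := PySem.Int.floordiv ((i - 1) * i) 2 + 1

def make_triangle_alt (n : Int) : List (List Int) :=
  if n ≤ 0 then []   -- Python raises ValueError here; excluded by Pre_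
  else
    (PySem.List.pyRange 1 (n + 1) 1).map
      (fun i => PySem.List.pyRange (pvRowStart i) (pvRowStart i + i) 1)

-- ===== PRECONDITION & SPEC =====
-- A raises ValueError exactly when n ≤ 0.
def Pre_make_triangle (n : Int) : Prop := 1 ≤ n
instance (n : Int) : Decidable (Pre_make_triangle n) := by unfold Pre_make_triangle; infer_instance
def pvWitness_make_triangle : Int := (3)

def Spec_make_triangle (n : Int) (out : List (List Int)) : Prop := out = make_triangle_alt n
instance (n : Int) (out : List (List Int)) : Decidable (Spec_make_triangle n out) := by unfold Spec_make_triangle; infer_instance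

-- ===== CLAIM (what is proved, stated in full; the proofs are below) =====
def Claim_equal_make_triangle : Prop := ∀ (n : Int), Dom_make_triangle n → Pre_make_triangle n → Spec_make_triangle n (make_triangle n)

-- ===== LEMMAS AND PROOFS =====

-- Loop invariant: after folding the first m values (1..m), A's accumulator pair is
-- (the rows B computes for 1..m, closed-form start m*(m+1)/2 + 1).
theorem pv_key (m : Nat) :
    (((List.range m).map (fun (k : Nat) => (1 : Int) + k)).foldl
      (fun (st : List (List Int) × Int) i =>
        (st.1 ++ [PySem.List.pyRange st.2 (st.2 + i) 1], st.2 + i))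
      ([], 1)) =
    (((List.range m).map (fun (k : Nat) => (1 : Int) + k)).map
       (fun i => PySem.List.pyRange (pvRowStart i) (pvRowStart i + i) 1),
     ((m * (m + 1) / 2 : Nat) : Int) + 1) := by
  induction m with
  | zero => simp
  | succ m ih =>
    rw [List.range_succ, List.map_append, List.foldl_append, List.map_append, ih]
    have hrs : pvRowStart ((1 : Int) + m) = ((m * (m + 1) / 2 : Nat) : Int) + 1 := by
      unfold pvRowStart
      have h2 : ((1 : Int) + m - 1) * (1 + m) = ((m * (m + 1) : Nat) : Int) := by push_cast; ring
      rw [h2, show (2:Int) = ((2:Nat):Int) from rfl, PySem.Int.floordiv_natCast]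
    simp only [List.map_cons, List.map_nil, List.foldl_cons, List.foldl_nil]
    refine Prod.ext ?_ ?_
    · simp [hrs]
    · simp only
      have he : (m + 1) * (m + 1 + 1) = m * (m + 1) + 2 * (m + 1) := by ring
      have hd : m * (m + 1) / 2 + (m + 1) = (m + 1) * (m + 1 + 1) / 2 := by omega
      omega

-- ===== VERDICT (by name: the statement is the Claim_ definition above) =====
theorem make_triangle_spec : Claim_equal_make_triangle := by
  intro n _ hpre
  unfold Pre_make_triangle at hpre
  have hn : ¬ n ≤ 0 := by omega
  unfold Spec_make_triangle make_triangle make_triangle_alt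
  rw [if_neg hn, if_neg hn]
  have hr : PySem.List.pyRange 1 (n + 1) 1 = (List.range n.toNat).map (fun (k : Nat) => (1 : Int) + k) := by
    rw [PySem.List.pyRange_one, show n + 1 - 1 = n from by ring]
  rw [hr, pv_key]
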